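-- pv_equiv track=rewrite | github.com/quattor/aquilon | tests/broker/eventstest.py | dict_match
-- ===== SOURCE A (Python) =====
-- def dict_match(want, got):
--     for field, value in want.items():
--         if field not in got:
--             return False
--         if isinstance(value, dict):
--             if not isinstance(got[field], dict):
--                 return False
--             if not dict_match(value, got[field]):
--                 return False
--         else:
--             if got[field] != want[field]:
--                 return False
--     return True
-- ===== SOURCE B (Python) =====
-- def dict_match(want, got):
--     # flat string->string dicts: want is a subset iff its item pairs all occur in got
--     return want.items() <= got.items()
-- ===== Notes on version B (the rewrite author's own statement) =====
-- stated objective: idiomatic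
-- what changed: Replaces A's recursive per-field loop (membership test plus lookup and explicit early returns) with Python's dict-view set inclusion want.items() <= got.items(), checking item-pair membership instead of key lookup.
import Mathlib
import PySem

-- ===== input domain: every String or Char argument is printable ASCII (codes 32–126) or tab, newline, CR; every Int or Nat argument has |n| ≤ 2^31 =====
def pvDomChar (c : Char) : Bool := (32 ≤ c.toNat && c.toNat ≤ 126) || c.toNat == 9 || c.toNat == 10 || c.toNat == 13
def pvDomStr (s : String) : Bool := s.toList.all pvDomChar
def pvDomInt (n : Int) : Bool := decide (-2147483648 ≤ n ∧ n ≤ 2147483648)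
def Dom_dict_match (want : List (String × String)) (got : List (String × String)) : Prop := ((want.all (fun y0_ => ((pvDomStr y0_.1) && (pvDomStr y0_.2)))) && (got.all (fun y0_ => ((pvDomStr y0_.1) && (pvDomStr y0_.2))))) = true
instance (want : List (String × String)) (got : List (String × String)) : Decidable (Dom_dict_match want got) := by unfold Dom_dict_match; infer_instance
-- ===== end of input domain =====

-- B is the idiomatic set-inclusion rewrite `want.items() <= got.items()`; equivalence is about
-- the RETURN value of flat str->str dicts (on this domain A's nested-dict branch never fires).

-- ===== PORT A =====
-- A's loop over want.items(): `field not in got` check, then `got[field] != want[field]`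
-- (the isinstance(value, dict) branch is never taken for str values, so it is not reachable here).
def dictMatchLoopA (items : List (String × String)) (g : PySem.Dict String String) : Bool :=
  match items with
  | [] => true
  | (f, v) :: rest =>
    match g.get? f with
    | none => false                    -- field not in got
    | some gv => if gv ≠ v then false  -- got[field] != want[field]
                 else dictMatchLoopA rest g

def dict_match (want : List (String × String)) (got : List (String × String)) : Bool :=
  dictMatchLoopA (PySem.Dict.ofList want).items (PySem.Dict.ofList got)

-- ===== PORT B =====
-- want.items() <= got.items(): every item pair of want occurs among got's item pairs
def dict_match_alt (want : List (String × String)) (got : List (String × String)) : Bool :=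
  (PySem.Dict.ofList want).items.all (fun p => decide (p ∈ (PySem.Dict.ofList got).items))

-- ===== PRECONDITION & SPEC =====
def Spec_dict_match (want : List (String × String)) (got : List (String × String)) (out : Bool) : Prop := out = dict_match_alt want got
instance (want : List (String × String)) (got : List (String × String)) (out : Bool) : Decidable (Spec_dict_match want got out) := by unfold Spec_dict_match; infer_instance

-- ===== CLAIM (what is proved, stated in full; the proofs are below) =====
def Claim_equal_dict_match : Prop := ∀ (want : List (String × String)) (got : List (String × String)), Dom_dict_match want got → Spec_dict_match want got (dict_match want got)

-- ===== LEMMAS AND PROOFS =====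
theorem dictMatchLoopA_eq_all (items : List (String × String)) (g : PySem.Dict String String)
    (hg : g.keys.Nodup) :
    dictMatchLoopA items g = items.all (fun p => decide (p ∈ g.items)) := by
  induction items with
  | nil => rfl
  | cons p rest ih =>
    obtain ⟨f, v⟩ := p
    simp only [dictMatchLoopA, List.all_cons, ih]
    cases hget : g.get? f with
    | none =>
      have : ¬ (f, v) ∈ g.items := by
        intro hmem
        have := (PySem.Dict.get?_eq_some_iff_mem_items g f v hg).mpr hmem
        rw [hget] at this
        simp at this
      simp [this]
    | some gv =>
      by_cases hv : gv = v
      · subst hv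
        have : (f, gv) ∈ g.items := PySem.Dict.mem_items_of_get?_eq_some g hget
        simp [this]
      · have : ¬ (f, v) ∈ g.items := by
          intro hmem
          have := (PySem.Dict.get?_eq_some_iff_mem_items g f v hg).mpr hmem
          rw [hget] at this
          exact hv (Option.some.inj this)
        simp [hv, this]

-- ===== VERDICT (by name: the statement is the Claim_ definition above) =====
theorem dict_match_spec : Claim_equal_dict_match := by
  intro want got _
  unfold Spec_dict_match dict_match dict_match_alt
  exact dictMatchLoopA_eq_all _ _ (PySem.Dict.nodup_keys_ofList got)
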